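-- pv_equiv track=rewrite | github.com/shaheenbehbehani/My_Projects | Movie Recommendation Optimizer/code/scripts/eval/step4_hybrid_eval.py | _aggregate_batch_metrics
-- ===== SOURCE A (Python) =====
-- from typing import Dict, List, Tuple, Any, Optional
--
-- def _aggregate_batch_metrics(batch_metrics: List[Dict[str, Any]]) -> Dict[str, Any]:
--     """Aggregate metrics across batches."""
--     if not batch_metrics:
--         return {}
--
--     # Simple aggregation for now
--     total_users = sum(bm.get('num_users', 0) for bm in batch_metrics)
--     total_gt_users = sum(bm.get('num_ground_truth_users', 0) for bm in batch_metrics)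
--
--     return {
--         'total_users_across_batches': total_users,
--         'total_ground_truth_users_across_batches': total_gt_users,
--         'num_batches': len(batch_metrics)
--     }
-- ===== SOURCE B (Python) =====
-- def _reduce(seg):
--     """Tree-reduce a non-empty segment to (users, gt_users, batch_count)."""
--     if len(seg) == 1:
--         bm = seg[0]
--         return (bm.get('num_users', 0), bm.get('num_ground_truth_users', 0), 1)
--     mid = len(seg) // 2
--     u1, g1, n1 = _reduce(seg[:mid])
--     u2, g2, n2 = _reduce(seg[mid:])
--     return (u1 + u2, g1 + g2, n1 + n2)
--
-- def _aggregate_batch_metrics(batch_metrics):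
--     """Aggregate metrics across batches by divide-and-conquer tree reduction."""
--     if not batch_metrics:
--         return {}
--     total_users, total_gt_users, num_batches = _reduce(batch_metrics)
--     return {
--         'total_users_across_batches': total_users,
--         'total_ground_truth_users_across_batches': total_gt_users,
--         'num_batches': num_batches
--     }
-- ===== Notes on version B (the rewrite author's own statement) =====
-- stated objective: alternative
-- what changed: Replaces A's two linear generator-expression sums (plus len) with a recursive divide-and-conquer tree reduction that splits the list in half and merges (users, gt_users, count) triples, computing all three aggregates in one recursion.
import Mathlib
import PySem

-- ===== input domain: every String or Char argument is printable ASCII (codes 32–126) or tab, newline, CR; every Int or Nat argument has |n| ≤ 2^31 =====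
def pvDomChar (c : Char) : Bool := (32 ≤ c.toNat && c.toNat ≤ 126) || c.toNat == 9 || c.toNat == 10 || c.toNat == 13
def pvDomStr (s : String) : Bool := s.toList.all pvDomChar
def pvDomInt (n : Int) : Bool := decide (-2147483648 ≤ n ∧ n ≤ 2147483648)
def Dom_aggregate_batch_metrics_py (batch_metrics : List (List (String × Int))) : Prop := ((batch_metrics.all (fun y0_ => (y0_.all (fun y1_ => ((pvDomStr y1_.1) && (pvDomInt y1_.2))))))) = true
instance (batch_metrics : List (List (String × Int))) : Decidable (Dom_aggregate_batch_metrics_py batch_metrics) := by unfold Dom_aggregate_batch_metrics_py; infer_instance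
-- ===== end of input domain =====

-- B replaces A's two linear generator-expression sums with a divide-and-conquer tree
-- reduction merging (users, gt_users, count) triples (alternative decomposition, same result).

-- ===== PORT A =====
def aggregate_batch_metrics_py (batch_metrics : List (List (String × Int))) : List (String × Int) :=
  if batch_metrics = [] then []
  else
    let total_users := (batch_metrics.map (fun bm => (PySem.Dict.mk bm).getD "num_users" 0)).sum
    let total_gt_users := (batch_metrics.map (fun bm => (PySem.Dict.mk bm).getD "num_ground_truth_users" 0)).sum
    [("total_users_across_batches", total_users),
     ("total_ground_truth_users_across_batches", total_gt_users),
     ("num_batches", (batch_metrics.length : Int))]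

-- ===== PORT B =====
-- port of Source B's _reduce: recursion on halves (Python slices seg[:mid]/seg[mid:] = take/drop).
-- The fuel argument (= initial length) and the [] / fuel-0 branches only make the recursion
-- structural/total; Python never calls _reduce on an empty segment.
def pvReduceBGo : Nat → List (List (String × Int)) → Int × Int × Int
  | _, [] => (0, 0, 0)
  | 0, _ => (0, 0, 0)
  | Nat.succ fuel, seg =>
    if seg.length ≤ 1 then
      match seg with
      | [] => (0, 0, 0)
      | bm :: _ =>
        ((PySem.Dict.mk bm).getD "num_users" 0, (PySem.Dict.mk bm).getD "num_ground_truth_users" 0, 1)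
    else
      let mid := seg.length / 2
      let r1 := pvReduceBGo fuel (seg.take mid)
      let r2 := pvReduceBGo fuel (seg.drop mid)
      (r1.1 + r2.1, r1.2.1 + r2.2.1, r1.2.2 + r2.2.2)

def pvReduceB (seg : List (List (String × Int))) : Int × Int × Int :=
  pvReduceBGo seg.length seg

def aggregate_batch_metrics_py_alt (batch_metrics : List (List (String × Int))) : List (String × Int) :=
  if batch_metrics = [] then []
  else
    let t := pvReduceB batch_metrics
    [("total_users_across_batches", t.1),
     ("total_ground_truth_users_across_batches", t.2.1),
     ("num_batches", t.2.2)]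

-- ===== PRECONDITION & SPEC =====
def Spec_aggregate_batch_metrics_py (batch_metrics : List (List (String × Int))) (out : List (String × Int)) : Prop := out = aggregate_batch_metrics_py_alt batch_metrics
instance (batch_metrics : List (List (String × Int))) (out : List (String × Int)) : Decidable (Spec_aggregate_batch_metrics_py batch_metrics out) := by unfold Spec_aggregate_batch_metrics_py; infer_instance

-- ===== CLAIM (what is proved, stated in full; the proofs are below) =====
def Claim_equal_aggregate_batch_metrics_py : Prop := ∀ (batch_metrics : List (List (String × Int))), Dom_aggregate_batch_metrics_py batch_metrics → Spec_aggregate_batch_metrics_py batch_metrics (aggregate_batch_metrics_py batch_metrics)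

-- ===== LEMMAS AND PROOFS =====

-- the tree reduction computes the two mapped sums and the length
theorem pvReduceBGo_eq (fuel : Nat) (seg : List (List (String × Int))) (hf : seg.length ≤ fuel) :
    pvReduceBGo fuel seg =
      ((seg.map (fun bm => (PySem.Dict.mk bm).getD "num_users" 0)).sum,
       (seg.map (fun bm => (PySem.Dict.mk bm).getD "num_ground_truth_users" 0)).sum,
       (seg.length : Int)) := by
  induction fuel generalizing seg with
  | zero =>
    have : seg = [] := List.length_eq_zero_iff.mp (Nat.le_zero.mp hf)
    subst this; simp [pvReduceBGo]
  | succ f ih =>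
    match seg with
    | [] => simp [pvReduceBGo]
    | bm :: rest =>
      rw [pvReduceBGo]
      by_cases h1 : (bm :: rest).length ≤ 1
      · have hr : rest = [] := by
          cases rest with
          | nil => rfl
          | cons a l => simp at h1
        subst hr; simp
      · simp only [if_neg h1]
        set l := bm :: rest with hl
        set m := l.length / 2 with hm
        have hlen : 2 ≤ l.length := by omega
        have hmt : (l.take m).length ≤ f := by
          simp only [List.length_take]; omega
        have hmd : (l.drop m).length ≤ f := by
          simp only [List.length_drop]; omega
        rw [ih _ hmt, ih _ hmd]
        have hsplit := List.take_append_drop m l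
        refine Prod.ext ?_ (Prod.ext ?_ ?_)
        · conv_rhs => rw [← hsplit]
          simp
        · conv_rhs => rw [← hsplit]
          simp
        · simp only [List.length_take, List.length_drop]
          push_cast
          omega

theorem pvReduceB_eq (seg : List (List (String × Int))) :
    pvReduceB seg =
      ((seg.map (fun bm => (PySem.Dict.mk bm).getD "num_users" 0)).sum,
       (seg.map (fun bm => (PySem.Dict.mk bm).getD "num_ground_truth_users" 0)).sum,
       (seg.length : Int)) :=
  pvReduceBGo_eq seg.length seg le_rfl

-- ===== VERDICT (by name: the statement is the Claim_ definition above) =====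
theorem aggregate_batch_metrics_py_spec : Claim_equal_aggregate_batch_metrics_py := by
  intro bms _
  unfold Spec_aggregate_batch_metrics_py aggregate_batch_metrics_py aggregate_batch_metrics_py_alt
  split_ifs with h
  · rfl
  · simp [pvReduceB_eq]
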